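-- pv_equiv track=rewrite | github.com/maestromusic/maestro | maestro/search/criteria.py | _findOperator
-- ===== SOURCE A (Python) =====
-- def _findOperator(string):
--     """Split a string like date>=2000 into three parts: *key* ('date'), *operator* ('>=') and *value*
--     ('2000') and return these three parts. Ignore whitespace around parts. If no operator is found,
--     *key* and *operator* will be None.
--     """
--     operators = ('=', '>=', '<=', '>', '<')
--     for i in range(len(string)):
--         for op in operators:
--             if string[i:].startswith(op):
--                 key = string[:i].strip().lower()
--                 value = string[i+len(op):].strip()
--                 return (key, op, value)
--     else: return (None, None, string)
-- ===== SOURCE B (Python) =====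
-- def _findOperator(string):
--     """Split a string like date>=2000 into (key, operator, value); whitespace stripped,
--     key lowercased. If no operator occurs, return (None, None, string)."""
--     operators = ('=', '>=', '<=', '>', '<')
--     best = None  # (index, operator) with the smallest index; earlier operator wins ties
--     for op in operators:
--         idx = string.find(op)
--         if idx != -1 and (best is None or idx < best[0]):
--             best = (idx, op)
--     if best is None:
--         return (None, None, string)
--     idx, op = best
--     return (string[:idx].strip().lower(), op, string[idx + len(op):].strip())
-- ===== Notes on version B (the rewrite author's own statement) =====
-- stated objective: faster
-- what changed: Instead of scanning every position and testing each operator against a fresh string[i:] slice, B computes string.find(op) once per operator and keeps the smallest index (strict-< update so the earlier operator in the tuple wins ties, preserving '>=' over '>'), then splits once at that index.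
import Mathlib
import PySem

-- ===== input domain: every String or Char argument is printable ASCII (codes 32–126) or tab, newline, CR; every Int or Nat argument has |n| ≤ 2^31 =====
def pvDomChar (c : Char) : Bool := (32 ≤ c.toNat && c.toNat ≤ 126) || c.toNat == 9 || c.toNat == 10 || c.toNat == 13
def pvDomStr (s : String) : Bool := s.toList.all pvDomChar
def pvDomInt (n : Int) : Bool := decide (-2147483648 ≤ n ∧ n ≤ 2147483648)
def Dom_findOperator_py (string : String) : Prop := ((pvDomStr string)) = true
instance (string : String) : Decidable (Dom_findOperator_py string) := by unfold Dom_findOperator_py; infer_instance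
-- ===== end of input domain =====

-- B replaces A's position-by-position scan (which tests all five operators against a fresh
-- string[i:] slice at every index) by one string.find per operator, keeping the smallest index
-- (strict-< update, so the earlier operator in the tuple wins a tie); objective: faster.

-- the operator tuple, shared verbatim by both Pythons
def pvOperators : List String := ["=", ">=", "<=", ">", "<"]

-- ===== PORT A =====
def findOperator_py (string : String) : Option String × Option String × String :=
  match (PySem.List.pyRange 0 (PySem.Str.len string)).findSome? (fun i =>
      pvOperators.findSome? (fun op =>
        if PySem.Str.startswith (PySem.Str.slice string (some i) none) op then
          some (some (PySem.Str.lower (PySem.Str.strip (PySem.Str.slice string none (some i)))),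
                some op,
                PySem.Str.strip (PySem.Str.slice string (some (i + PySem.Str.len op)) none))
        else none)) with
  | some r => r
  | none => (none, none, string)

-- ===== PORT B =====
-- B's loop body: keep the smaller index; on a tie the operator already held (earlier in the tuple) wins
def pvStep (s : String) (best : Option (Int × String)) (op : String) : Option (Int × String) :=
  let idx := PySem.Str.find s op
  match best with
  | none => if idx = -1 then none else some (idx, op)
  | some (bi, bop) => if idx ≠ -1 ∧ idx < bi then some (idx, op) else some (bi, bop)

def findOperator_py_alt (string : String) : Option String × Option String × String :=
  let best := pvOperators.foldl (pvStep string) none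
  match best with
  | none => (none, none, string)
  | some (idx, op) =>
      (some (PySem.Str.lower (PySem.Str.strip (PySem.Str.slice string none (some idx)))),
       some op,
       PySem.Str.strip (PySem.Str.slice string (some (idx + PySem.Str.len op)) none))

-- ===== PRECONDITION & SPEC =====
def Spec_findOperator_py (string : String) (out : Option String × Option String × String) : Prop := out = findOperator_py_alt string
instance (string : String) (out : Option String × Option String × String) : Decidable (Spec_findOperator_py string out) := by unfold Spec_findOperator_py; infer_instance

-- ===== CLAIM (what is proved, stated in full; the proofs are below) =====
def Claim_equal_findOperator_py : Prop := ∀ (string : String), Dom_findOperator_py string → Spec_findOperator_py string (findOperator_py string)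

-- ===== LEMMAS AND PROOFS =====

-- the common result builder of the two ports
def pvMk (s : String) (i : Int) (op : String) : Option String × Option String × String :=
  (some (PySem.Str.lower (PySem.Str.strip (PySem.Str.slice s none (some i)))),
   some op,
   PySem.Str.strip (PySem.Str.slice s (some (i + PySem.Str.len op)) none))

-- A's selector: first position, first operator matching there
def pvSel (s : String) : Option (Int × String) :=
  (PySem.List.pyRange 0 (PySem.Str.len s)).findSome? (fun i =>
    (pvOperators.findSome? (fun op =>
      if PySem.Str.startswith (PySem.Str.slice s (some i) none) op then some op else none)).map
      (Prod.mk i))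

-- generic: a guarded findSome? that builds h x factors through the selector
theorem pv_findSome?_guard_map {α β : Type} (l : List α) (c : α → Bool) (h : α → β) :
    l.findSome? (fun x => if c x then some (h x) else none)
      = (l.findSome? (fun x => if c x then some x else none)).map h := by
  induction l with
  | nil => rfl
  | cons a t ih => by_cases hc : c a <;> simp [hc, ih]

-- generic: findSome? building a value from the index factors through a pairing selector
theorem pv_findSome?_pair {ι α β : Type} (l : List ι) (g : ι → Option α) (h : ι → α → β) :
    l.findSome? (fun i => (g i).map (h i))
      = (l.findSome? (fun i => (g i).map (Prod.mk i))).map (fun p => h p.1 p.2) := by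
  induction l with
  | nil => rfl
  | cons a t ih => cases hg : g a <;> simp [hg, ih]

theorem pvA_eq (s : String) :
    findOperator_py s = match pvSel s with
      | some p => pvMk s p.1 p.2
      | none => (none, none, s) := by
  unfold findOperator_py pvSel pvMk
  have h1 : ∀ i : Int,
      pvOperators.findSome? (fun op =>
        if PySem.Str.startswith (PySem.Str.slice s (some i) none) op then
          some (some (PySem.Str.lower (PySem.Str.strip (PySem.Str.slice s none (some i)))),
                some op,
                PySem.Str.strip (PySem.Str.slice s (some (i + PySem.Str.len op)) none))
        else none)
      = (pvOperators.findSome? (fun op =>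
          if PySem.Str.startswith (PySem.Str.slice s (some i) none) op then some op else none)).map
          (fun op => pvMk s i op) := by
    intro i
    exact pv_findSome?_guard_map pvOperators _ (fun op => pvMk s i op)
  simp only [h1, pvMk]
  rw [pv_findSome?_pair]
  cases (PySem.List.pyRange 0 (PySem.Str.len s)).findSome?
      (fun i => (pvOperators.findSome? (fun op =>
        if PySem.Str.startswith (PySem.Str.slice s (some i) none) op then some op else none)).map
        (Prod.mk i)) <;> rfl

theorem pvB_eq (s : String) :
    findOperator_py_alt s = match pvOperators.foldl (pvStep s) none with
      | some p => pvMk s p.1 p.2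
      | none => (none, none, s) := by
  unfold findOperator_py_alt pvMk
  cases h : pvOperators.foldl (pvStep s) none with
  | none => simp
  | some p => cases p; simp

-- fold = none iff no operator occurs at all
theorem pvStep_none (s op : String) :
    pvStep s none op = if PySem.Str.find s op = -1 then none else some (PySem.Str.find s op, op) := rfl

theorem pvStep_some (s op : String) (bi : Int) (bop : String) :
    pvStep s (some (bi, bop)) op =
      if PySem.Str.find s op ≠ -1 ∧ PySem.Str.find s op < bi
      then some (PySem.Str.find s op, op) else some (bi, bop) := rfl

-- fold = none iff no operator occurs at all
theorem pv_fold_none_iff (s : String) (ops : List String) :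
    ∀ acc, ops.foldl (pvStep s) acc = none ↔ acc = none ∧ ∀ op ∈ ops, PySem.Str.find s op = -1 := by
  induction ops with
  | nil => intro acc; simp [List.foldl]
  | cons op₀ rest ih =>
    intro acc
    rw [List.foldl_cons, ih]
    constructor
    · rintro ⟨h1, h2⟩
      cases acc with
      | none =>
        rw [pvStep_none] at h1
        split_ifs at h1 with h
        · refine ⟨rfl, fun op hop => ?_⟩
          rcases List.mem_cons.mp hop with rfl | hop
          exacts [h, h2 _ hop]
      | some p =>
        obtain ⟨bi, bop⟩ := p
        rw [pvStep_some] at h1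
        split_ifs at h1
    · rintro ⟨rfl, h2⟩
      exact ⟨by rw [pvStep_none, if_pos (h2 op₀ (by simp))],
             fun op hop => h2 op (List.mem_cons_of_mem _ hop)⟩

-- master characterisation of B's fold when it returns some (i, op)
theorem pv_fold_some_spec (s : String) (ops : List String) :
    ∀ acc i op, ops.foldl (pvStep s) acc = some (i, op) →
      (acc = some (i, op) ∧ ∀ op' ∈ ops, PySem.Str.find s op' = -1 ∨ i ≤ PySem.Str.find s op')
      ∨ (∃ pre post, ops = pre ++ op :: post ∧ PySem.Str.find s op = i
          ∧ (∀ op' ∈ pre, PySem.Str.find s op' = -1 ∨ i < PySem.Str.find s op')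
          ∧ (∀ op' ∈ post, PySem.Str.find s op' = -1 ∨ i ≤ PySem.Str.find s op')
          ∧ (∀ ai aop, acc = some (ai, aop) → i < ai)) := by
  induction ops with
  | nil =>
    intro acc i op h
    simp only [List.foldl_nil] at h
    exact Or.inl ⟨h, by simp⟩
  | cons op₀ rest ih =>
    intro acc i op h
    rw [List.foldl_cons] at h
    rcases ih (pvStep s acc op₀) i op h with ⟨hacc, hall⟩ | ⟨pre, post, hsplit, hfind, hpre, hpost, haccs⟩
    · -- the accumulator after processing op₀ survived the rest of the fold
      cases acc with
      | none =>
        rw [pvStep_none] at hacc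
        split_ifs at hacc with hf
        injection hacc with h1; injection h1 with hA hB; subst hA; subst hB
        exact Or.inr ⟨[], rest, by simp, rfl, by simp, hall, by simp⟩
      | some p =>
        obtain ⟨bi, bop⟩ := p
        rw [pvStep_some] at hacc
        split_ifs at hacc with hf
        · injection hacc with h1; injection h1 with hA hB; subst hA; subst hB
          exact Or.inr ⟨[], rest, by simp, rfl, by simp, hall,
            fun ai aop ha => by
              injection ha with h1; injection h1 with hA hB; subst hA; exact hf.2⟩
        · injection hacc with h1; injection h1 with hA hB; subst hA; subst hB
          refine Or.inl ⟨rfl, fun op' hop' => ?_⟩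
          rcases List.mem_cons.mp hop' with rfl | hop'
          · rcases not_and_or.mp hf with h' | h'
            · exact Or.inl (not_not.mp h')
            · exact Or.inr (le_of_not_gt h')
          · exact hall op' hop'
    · -- the winner came from rest
      refine Or.inr ⟨op₀ :: pre, post, by rw [hsplit]; rfl, hfind, ?_, hpost, ?_⟩
      · intro op' hop'
        rcases List.mem_cons.mp hop' with rfl | hop'
        · -- op' is the head op₀; compare through the accumulator it produced
          cases acc with
          | none =>
            rw [pvStep_none] at haccs
            split_ifs at haccs with hf
            · exact Or.inl hf
            · exact Or.inr (haccs _ _ rfl)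
          | some p =>
            obtain ⟨bi, bop⟩ := p
            rw [pvStep_some] at haccs
            split_ifs at haccs with hf
            · exact Or.inr (haccs _ _ rfl)
            · rcases not_and_or.mp hf with h' | h'
              · exact Or.inl (not_not.mp h')
              · exact Or.inr (lt_of_lt_of_le (haccs _ _ rfl) (le_of_not_gt h'))
        · exact hpre op' hop'
      · intro ai aop ha
        subst ha
        rw [pvStep_some] at haccs
        split_ifs at haccs with hf
        · exact lt_trans (haccs _ _ rfl) hf.2
        · exact haccs _ _ rfl

-- findSome? over range' finds the first hit
theorem pv_findSome?_range' {α : Type} (f : Nat → Option α) (i : Nat) (r : α)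
    (h2 : f i = some r) (n start : Nat)
    (h1 : ∀ j, start ≤ j → j < i → f j = none) (hs : start ≤ i) (hi : i < start + n) :
    (List.range' start n).findSome? f = some r := by
  induction n generalizing start with
  | zero => omega
  | succ n ihn =>
    rw [List.range'_succ, List.findSome?_cons]
    rcases eq_or_lt_of_le hs with rfl | hlt
    · simp [h2]
    · rw [h1 start le_rfl hlt]
      exact ihn (start + 1) (fun j hj hj' => h1 j (by omega) hj') hlt (by omega)

-- translation of A's guard: startswith on the slice is a prefix test on the dropped list
theorem pv_sw (s : String) (j : Nat) (op : String) :
    PySem.Str.startswith (PySem.Str.slice s (some (j : Int)) none) op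
      = decide (op.toList <+: s.toList.drop j) := by
  have hl : (PySem.Str.slice s (some (j : Int)) none).toList = s.toList.drop j := by
    rw [PySem.Str.toList_slice, PySem.Chars.slice_eq_listSlice,
        PySem.List.slice_from_natCast]
  rw [PySem.Str.startswith_eq, hl]
  by_cases h : op.toList <+: s.toList.drop j
  · simp [h, (PySem.Chars.startswith_iff _ _).mpr h]
  · simp only [h, decide_false]
    rw [← Bool.not_eq_true]
    intro hc
    exact absurd ((PySem.Chars.startswith_iff _ _).mp hc) h

theorem pv_find_no_prefix (s op : String) (h : PySem.Str.find s op = -1) (j : Nat) :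
    ¬ op.toList <+: s.toList.drop j := by
  intro hpre
  rw [PySem.Str.find_eq] at h
  exact (PySem.Chars.find_eq_neg_one_iff _ _).mp h
    ((PySem.Chars.isIn_iff_infix _ _).mp
      ((PySem.Chars.exists_prefix_drop_iff_isIn _ _).mp ⟨j, hpre⟩))

theorem pv_find_min (s op : String) (j : Nat) (h : (j : Int) < PySem.Str.find s op) :
    ¬ op.toList <+: s.toList.drop j := by
  rw [PySem.Str.find_eq] at h
  have h0 : (0 : Int) ≤ PySem.Chars.find s.toList op.toList := by omega
  exact (PySem.Chars.find_spec h0).2 j (by omega)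

theorem pv_find_prefix (s op : String) (h : 0 ≤ PySem.Str.find s op) :
    op.toList <+: s.toList.drop (PySem.Str.find s op).toNat := by
  rw [PySem.Str.find_eq] at h ⊢
  exact (PySem.Chars.find_spec h).1

-- the fold never stores index -1
theorem pv_fold_ne_neg_one (s : String) (ops : List String) :
    ∀ acc, (∀ ai aop, acc = some (ai, aop) → ai ≠ -1) →
      ∀ i op, ops.foldl (pvStep s) acc = some (i, op) → i ≠ -1 := by
  induction ops with
  | nil => intro acc hacc i op h; simp only [List.foldl_nil] at h; exact hacc i op h
  | cons op₀ rest ih =>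
    intro acc hacc i op h
    rw [List.foldl_cons] at h
    refine ih (pvStep s acc op₀) ?_ i op h
    intro ai aop ha
    cases acc with
    | none =>
      rw [pvStep_none] at ha
      split_ifs at ha with hf
      injection ha with h1; injection h1 with hA _; omega
    | some p =>
      obtain ⟨bi, bop⟩ := p
      rw [pvStep_some] at ha
      split_ifs at ha with hf
      · injection ha with h1; injection h1 with hA _; subst hA; exact hf.1
      · injection ha with h1; injection h1 with hA _; subst hA; exact hacc _ bop rfl

-- crux: A's first-position scan equals B's minimal-find fold
theorem pv_sel_eq_fold (s : String) :
    pvSel s = pvOperators.foldl (pvStep s) none := by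
  cases hb : pvOperators.foldl (pvStep s) none with
  | none =>
    have hall := ((pv_fold_none_iff s pvOperators none).mp hb).2
    unfold pvSel
    rw [PySem.Str.len_eq, PySem.List.pyRange_zero_natCast, List.findSome?_map,
        List.range_eq_range', List.findSome?_eq_none_iff]
    intro j _
    have hg : pvOperators.findSome? (fun op =>
        if PySem.Str.startswith (PySem.Str.slice s (some ((j : Nat) : Int)) none) op
        then some op else none) = none := by
      rw [List.findSome?_eq_none_iff]
      intro op hop
      rw [pv_sw s j op, decide_eq_false (pv_find_no_prefix s op (hall op hop) j)]
      rfl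
    simp only [Function.comp_apply, hg, Option.map_none]
  | some p =>
    obtain ⟨i, op⟩ := p
    rcases pv_fold_some_spec s pvOperators none i op hb with ⟨habs, _⟩ | ⟨pre, post, hsplit, hfind, hpre, hpost, _⟩
    · cases habs
    · have hne : i ≠ -1 := pv_fold_ne_neg_one s pvOperators none (by simp) i op hb
      have hge : 0 ≤ i := by
        have := PySem.Chars.neg_one_le_find s.toList op.toList
        rw [← PySem.Str.find_eq, hfind] at this
        omega
      have hopmem : op ∈ pvOperators := by rw [hsplit]; exact List.mem_append_right _ (List.mem_cons_self)
      have hopne : op.toList ≠ [] := by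
        have : ∀ o ∈ pvOperators, o.toList ≠ [] := by decide
        exact this op hopmem
      have hopK : op.toList <+: s.toList.drop i.toNat := by
        have := pv_find_prefix s op (by omega)
        rwa [hfind] at this
      have hkn : i.toNat < s.toList.length := by
        rcases hopK with ⟨t, ht⟩
        have h1 : 0 < (s.toList.drop i.toNat).length := by
          rw [← ht, List.length_append]
          cases hcl : op.toList with
          | nil => exact absurd hcl hopne
          | cons c cs => simp
        rw [List.length_drop] at h1
        omega
      -- no operator matches strictly before position i
      have hbefore : ∀ (j : Nat), (j : Int) < i → ∀ op' ∈ pvOperators, ¬ op'.toList <+: s.toList.drop j := by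
        intro j hj op' hop'
        have hop3 : PySem.Str.find s op' = -1 ∨ i ≤ PySem.Str.find s op' := by
          rw [hsplit] at hop'
          rcases List.mem_append.mp hop' with h' | h'
          · rcases hpre op' h' with h'' | h''
            exacts [Or.inl h'', Or.inr (le_of_lt h'')]
          · rcases List.mem_cons.mp h' with rfl | h''
            · exact Or.inr (le_of_eq hfind.symm)
            · exact hpost op' h''
        rcases hop3 with h' | h'
        · exact pv_find_no_prefix s op' h' j
        · exact pv_find_min s op' j (by omega)
      -- at position i, no operator before op in the tuple matches
      have hpreK : ∀ op' ∈ pre, ¬ op'.toList <+: s.toList.drop i.toNat := by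
        intro op' hop'
        rcases hpre op' hop' with h' | h'
        · exact pv_find_no_prefix s op' h' _
        · exact pv_find_min s op' i.toNat (by omega)
      unfold pvSel
      rw [PySem.Str.len_eq, PySem.List.pyRange_zero_natCast, List.findSome?_map,
          List.range_eq_range']
      refine pv_findSome?_range' _ i.toNat (i, op) ?_ s.toList.length 0 ?_ (Nat.zero_le _) (by omega)
      · -- the hit at position i.toNat
        have hg : pvOperators.findSome? (fun o =>
            if PySem.Str.startswith (PySem.Str.slice s (some ((i.toNat : Nat) : Int)) none) o
            then some o else none) = some op := by
          rw [hsplit, List.findSome?_append]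
          have h1 : pre.findSome? (fun o =>
              if PySem.Str.startswith (PySem.Str.slice s (some ((i.toNat : Nat) : Int)) none) o
              then some o else none) = none := by
            rw [List.findSome?_eq_none_iff]
            intro o ho
            rw [pv_sw s i.toNat o, decide_eq_false (hpreK o ho)]
            rfl
          rw [h1, List.findSome?_cons, pv_sw s i.toNat op, decide_eq_true hopK]
          rfl
        simp only [Function.comp_apply, hg, Option.map_some]
        congr 1
        simp [Prod.ext_iff]
        omega
      · -- nothing matches before
        intro j _ hj
        have hg : pvOperators.findSome? (fun o =>
            if PySem.Str.startswith (PySem.Str.slice s (some ((j : Nat) : Int)) none) o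
            then some o else none) = none := by
          rw [List.findSome?_eq_none_iff]
          intro o ho
          rw [pv_sw s j o, decide_eq_false (hbefore j (by omega) o ho)]
          rfl
        simp only [Function.comp_apply, hg, Option.map_none]

theorem findOperator_py_spec_aux (s : String) : findOperator_py s = findOperator_py_alt s := by
  rw [pvA_eq, pvB_eq, pv_sel_eq_fold]

-- ===== VERDICT (by name: the statement is the Claim_ definition above) =====
theorem findOperator_py_spec : Claim_equal_findOperator_py := by
  intro s _
  unfold Spec_findOperator_py
  exact findOperator_py_spec_aux s
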